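-- pv_equiv track=rewrite | github.com/TomaszMielecki/pp1_clone | 04-Subroutines/p31.py | f
-- ===== SOURCE A (Python) =====
-- def f(x,y):
--
--     x=int(x)
--     y=int(y)
--
--     m=0
--
--     for number in range(x,y):
--         if int(number)<0 and int(number)%2 == 0:
--             m = m+1
--         else:
--             continue
--     return m
-- ===== SOURCE B (Python) =====
-- def f(x, y):
--     x = int(x)
--     y = int(y)
--     hi = min(y, 0)          # negative numbers in range(x, y) are those in [x, hi)
--     if x >= hi:
--         return 0
--     return (hi + 1) // 2 - (x + 1) // 2   # count of even integers in [x, hi)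
-- ===== Notes on version B (the rewrite author's own statement) =====
-- stated objective: faster
-- what changed: Replaces the per-element loop over range(x, y) with a closed-form count of even integers in [x, min(y, 0)) using two floor divisions.
import Mathlib
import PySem

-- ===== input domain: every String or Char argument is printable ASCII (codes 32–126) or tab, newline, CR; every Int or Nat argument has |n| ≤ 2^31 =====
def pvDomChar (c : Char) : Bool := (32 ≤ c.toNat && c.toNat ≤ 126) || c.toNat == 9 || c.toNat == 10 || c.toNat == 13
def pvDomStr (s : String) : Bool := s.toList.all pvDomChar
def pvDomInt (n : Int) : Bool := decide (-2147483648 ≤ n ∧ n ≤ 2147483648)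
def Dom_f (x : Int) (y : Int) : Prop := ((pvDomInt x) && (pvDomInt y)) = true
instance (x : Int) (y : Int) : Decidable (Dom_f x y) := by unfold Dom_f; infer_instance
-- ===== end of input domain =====

-- B replaces A's O(y-x) loop with a closed-form O(1) count of even integers in [x, min(y,0)).

-- ===== PORT A =====
def f (x : Int) (y : Int) : Int :=
  (PySem.List.pyRange x y 1).foldl
    (fun m number => if number < 0 ∧ PySem.Int.mod number 2 = 0 then m + 1 else m) 0

-- ===== PORT B =====
def f_alt (x : Int) (y : Int) : Int :=
  let hi := min y 0
  if x ≥ hi then 0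
  else PySem.Int.floordiv (hi + 1) 2 - PySem.Int.floordiv (x + 1) 2

-- ===== PRECONDITION & SPEC =====
def Spec_f (x : Int) (y : Int) (out : Int) : Prop := out = f_alt x y
instance (x : Int) (y : Int) (out : Int) : Decidable (Spec_f x y out) := by unfold Spec_f; infer_instance

-- ===== CLAIM (what is proved, stated in full; the proofs are below) =====
def Claim_equal_f : Prop := ∀ (x : Int) (y : Int), Dom_f x y → Spec_f x y (f x y)

-- ===== LEMMAS AND PROOFS =====

-- one step of B's closed form: peeling the first element of the range
theorem f_alt_step (x y : Int) (h : x < y) :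
    f_alt x y = (if x < 0 ∧ PySem.Int.mod x 2 = 0 then 1 else 0) + f_alt (x + 1) y := by
  simp only [f_alt, PySem.Int.floordiv_eq_ediv_of_pos (by omega : (0:Int) < 2),
    PySem.Int.mod_eq_emod_of_pos (by omega : (0:Int) < 2)]
  split_ifs <;> omega

-- the loop, started at any accumulator, computes m + B's closed form
theorem f_loop (y : Int) : ∀ (k : Nat) (x m : Int), (y - x).toNat = k →
    (PySem.List.pyRange x y 1).foldl
      (fun m number => if number < 0 ∧ PySem.Int.mod number 2 = 0 then m + 1 else m) m
    = m + f_alt x y := by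
  intro k
  induction k with
  | zero =>
    intro x m hk
    rw [PySem.List.pyRange_one_eq_nil (by omega)]
    have hge : x ≥ min y 0 := by omega
    simp [f_alt, hge]
  | succ n ih =>
    intro x m hk
    rw [PySem.List.pyRange_one_cons (by omega), List.foldl_cons,
      f_alt_step x y (by omega)]
    rw [ih (x + 1) _ (by omega)]
    split_ifs <;> ring

-- ===== VERDICT (by name: the statement is the Claim_ definition above) =====
theorem f_spec : Claim_equal_f := by
  intro x y _
  unfold Spec_f f
  rw [f_loop y (y - x).toNat x 0 rfl, zero_add]
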